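-- pv_equiv track=rewrite | github.com/HinesW57/EverybodyCodes | Quest2/p3.py | search_horizontal
-- ===== SOURCE A (Python) =====
-- def search_horizontal(runes, inscriptions):
--     rows = len(inscriptions)
--     cols = len(inscriptions[0])
--
--     covered_indices = set()
--
--     for r, row in enumerate(inscriptions):
--         for rune in runes:
--             pattern_length = len(rune)
--             extended_row = row + row  # simulate wrap around
--
--             # search in both direction
--             for direction in [rune, rune[::-1]]:
--                 start = 0
--                 while True:
--                     index = extended_row.find(direction, start)
--                     if (
--                         index == -1 or index >= cols
--                     ):  # only count matches in the actual row
--                         break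
--
--                     # add indices for the match
--                     for i in range(index, index + pattern_length):
--                         covered_indices.add((r, i % cols))  # use modulo for wrapping
--
--                     start = index + 1
--
--     return covered_indices
-- ===== SOURCE B (Python) =====
-- def search_horizontal(runes, inscriptions):
--     cols = len(inscriptions[0])
--     covered = set()
--     for r, row in enumerate(inscriptions):
--         extended = row + row  # wrap-around buffer
--         for rune in runes:
--             for direction in (rune, rune[::-1]):
--                 # candidate-sieve: keep the start positions still viable,
--                 # eliminating them one pattern offset at a time
--                 candidates = [s for s in range(cols) if s + len(direction) <= len(extended)]
--                 for j, ch in enumerate(direction):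
--                     candidates = [s for s in candidates if extended[s + j] == ch]
--                 for s in candidates:
--                     for i in range(s, s + len(direction)):
--                         covered.add((r, i % cols))
--     return covered
-- ===== Notes on version B (the rewrite author's own statement) =====
-- stated objective: alternative
-- what changed: B replaces A's per-rune str.find while-loop over the doubled row with a candidate-sieve: it starts from the list of viable start positions and filters it once per pattern offset (one staged pass per character of the rune), then expands the surviving starts into covered cells; no find, no per-position slice comparison.
-- outside the precondition, e.g. on search_horizontal(['ab'], []): A raises IndexError, B raises IndexError
import Mathlib
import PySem

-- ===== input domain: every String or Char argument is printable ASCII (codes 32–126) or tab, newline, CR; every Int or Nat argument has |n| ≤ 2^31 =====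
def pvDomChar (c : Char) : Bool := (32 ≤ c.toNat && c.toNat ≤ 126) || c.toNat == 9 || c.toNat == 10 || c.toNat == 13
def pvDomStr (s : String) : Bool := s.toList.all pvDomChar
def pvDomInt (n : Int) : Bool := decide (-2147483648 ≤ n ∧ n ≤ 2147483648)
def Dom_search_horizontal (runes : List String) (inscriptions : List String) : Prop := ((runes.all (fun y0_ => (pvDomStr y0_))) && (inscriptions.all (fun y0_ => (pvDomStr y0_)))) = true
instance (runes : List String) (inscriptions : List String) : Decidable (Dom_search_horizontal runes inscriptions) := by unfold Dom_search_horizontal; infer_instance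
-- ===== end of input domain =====

-- B replaces A's per-rune str.find while-loop over the doubled row with a candidate sieve:
-- the list of viable start positions is filtered once per pattern offset, then the
-- surviving starts are expanded into covered cells (objective: alternative).

-- ===== PORT A =====
-- A's `while True:` find loop; Python's loop terminates after at most cols+1 iterations
-- (start strictly increases and stays ≤ cols), so fuel = cols.toNat + 1 is sufficient.
def pvALoop (fuel : Nat) (cols : Int) (r : Int) (ext dir : List Char) (plen : Int)
    (start : Nat) (acc : List (Int × Int)) : List (Int × Int) :=
  match fuel with
  | 0 => acc
  | Nat.succ fuel =>
    let index := PySem.Chars.findFrom ext dir (start : Int)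
    if index = -1 ∨ cols ≤ index then acc
    else
      pvALoop fuel cols r ext dir plen (index.toNat + 1)
        ((PySem.List.pyRange index (index + plen) 1).foldl
          (fun a i => PySem.Set.add a (r, PySem.Int.mod i cols)) acc)

def search_horizontal (runes : List String) (inscriptions : List String) : List (Int × Int) :=
  let cols : Int := PySem.Str.len (PySem.List.pyGetD inscriptions 0 "")
  (PySem.List.enumerate inscriptions).foldl (fun acc rrow =>
    runes.foldl (fun acc rune =>
      let plen := PySem.Str.len rune
      let ext := rrow.2.toList ++ rrow.2.toList
      [rune.toList, rune.toList.reverse].foldl (fun acc dir =>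
        pvALoop (cols.toNat + 1) cols rrow.1 ext dir plen 0 acc) acc) acc) []

-- ===== PORT B =====
-- B's body for one direction: the candidate comprehension, the per-offset sieve,
-- and the expansion of the surviving starts.
def pvBDir (cols : Int) (r : Int) (ext dir : List Char) (acc : List (Int × Int)) :
    List (Int × Int) :=
  let plen : Int := (dir.length : Int)
  let cand0 := (PySem.List.pyRange 0 cols 1).filter
    (fun s => decide (s + plen ≤ (ext.length : Int)))
  -- extended[s + j]: always in range (candidates satisfy s + plen ≤ len(extended) and s ≥ 0),
  -- so comparing the Option to `some ch` is exact here
  let cand := (PySem.List.enumerate dir).foldl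
    (fun c jc => c.filter (fun s => PySem.List.pyGet? ext (s + jc.1) == some jc.2)) cand0
  cand.foldl (fun acc s =>
    (PySem.List.pyRange s (s + plen) 1).foldl
      (fun a i => PySem.Set.add a (r, PySem.Int.mod i cols)) acc) acc

def search_horizontal_alt (runes : List String) (inscriptions : List String) : List (Int × Int) :=
  let cols : Int := PySem.Str.len (PySem.List.pyGetD inscriptions 0 "")
  (PySem.List.enumerate inscriptions).foldl (fun acc rrow =>
    let ext := rrow.2.toList ++ rrow.2.toList
    runes.foldl (fun acc rune =>
      [rune.toList, rune.toList.reverse].foldl (fun acc dir =>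
        pvBDir cols rrow.1 ext dir acc) acc) acc) []

-- ===== PRECONDITION & SPEC =====
-- Pre_ excludes only the empty inscription list, on which A raises IndexError at inscriptions[0].
def Pre_search_horizontal (runes : List String) (inscriptions : List String) : Prop :=
  inscriptions ≠ []
instance (runes : List String) (inscriptions : List String) : Decidable (Pre_search_horizontal runes inscriptions) := by unfold Pre_search_horizontal; infer_instance

def pvWitness_search_horizontal : List String × List String := (["ab"], ["aba", "bab"])

def Spec_search_horizontal (runes : List String) (inscriptions : List String) (out : List (Int × Int)) : Prop := out = search_horizontal_alt runes inscriptions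
instance (runes : List String) (inscriptions : List String) (out : List (Int × Int)) : Decidable (Spec_search_horizontal runes inscriptions out) := by unfold Spec_search_horizontal; infer_instance

-- ===== CLAIM (what is proved, stated in full; the proofs are below) =====
def Claim_equal_search_horizontal : Prop := ∀ (runes : List String) (inscriptions : List String), Dom_search_horizontal runes inscriptions → Pre_search_horizontal runes inscriptions → Spec_search_horizontal runes inscriptions (search_horizontal runes inscriptions)

-- ===== LEMMAS AND PROOFS =====

-- a foldl whose every step fixes the accumulator is the identity
theorem pv_foldl_fixed {α β : Type} (f : α → β → α) (l : List β)
    (h : ∀ a b, b ∈ l → f a b = a) (a : α) : l.foldl f a = a := by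
  induction l generalizing a with
  | nil => rfl
  | cons x xs ih => simp only [List.foldl_cons, h a x (by simp)]; exact ih (fun a b hb => h a b (by simp [hb])) a

-- str.find with a start index past the end of the string is -1 (CPython's rule)
theorem pv_findFrom_past (s sub : List Char) (k : Nat) (h : s.length < k) :
    PySem.Chars.findFrom s sub (k : Int) none = -1 := by
  simp [PySem.Chars.findFrom]
  intro h1; omega

-- a prefix of a drop is an infix
theorem pv_prefix_drop_infix (dir Y : List Char) (m : Nat) (h : dir <+: Y.drop m) :
    dir <:+: Y :=
  h.isInfix.trans (List.drop_suffix m Y).isInfix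

-- A's match test at position s is "dir is a prefix of ext.drop s"
theorem pv_slice_test (ext dir : List Char) (s : Nat) :
    (PySem.List.slice ext (some (s : Int)) (some ((s : Int) + (dir.length : Int))) = dir)
      ↔ dir <+: ext.drop s := by
  rw [PySem.List.slice_natCast_add ext s dir.length, List.prefix_iff_eq_take]
  exact ⟨fun h => h.symm, fun h => h.symm⟩

-- A's step at one scanned position (marks on a match, identity otherwise)
def pvStep (cols : Nat) (r : Int) (ext dir : List Char) (acc : List (Int × Int)) (s : Nat) :
    List (Int × Int) :=
  if PySem.List.slice ext (some (s : Int)) (some ((s : Int) + (dir.length : Int))) = dir then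
    (PySem.List.pyRange (s : Int) ((s : Int) + (dir.length : Int)) 1).foldl
      (fun a i => PySem.Set.add a (r, PySem.Int.mod i (cols : Int))) acc
  else acc

theorem pv_step_no_match (cols : Nat) (r : Int) (ext dir : List Char)
    (acc : List (Int × Int)) (s : Nat) (h : ¬ dir <+: ext.drop s) :
    pvStep cols r ext dir acc s = acc := by
  unfold pvStep
  rw [if_neg (fun hc => h ((pv_slice_test ext dir s).mp hc))]

-- the central A-side characterisation: A's find loop from `start` scans [start, cols)
theorem pv_loop_eq (cols : Nat) (r : Int) (ext dir : List Char) :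
    ∀ (fuel start : Nat) (acc : List (Int × Int)), start ≤ cols → cols + 1 - start ≤ fuel →
    pvALoop fuel (cols : Int) r ext dir (dir.length : Int) start acc
      = (List.range' start (cols - start)).foldl (pvStep cols r ext dir) acc := by
  intro fuel
  induction fuel with
  | zero => intro start acc h1 h2; omega
  | succ fuel ih =>
    intro start acc h1 h2
    by_cases hpast : ext.length < start
    · -- start is past the end: find returns -1, and no position ≥ start can match (or the
      -- match is the empty pattern, whose marking loop is empty)
      rw [pvALoop, pv_findFrom_past ext dir start hpast]
      refine (pv_foldl_fixed _ _ (fun a s hs => ?_) acc).symm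
      have hs' : start ≤ s := (List.mem_range'_1.mp hs).1
      unfold pvStep
      by_cases hdir : dir = []
      · subst hdir; simp [PySem.List.pyRange]
      · rw [if_neg]
        intro hc
        have hp := (pv_slice_test ext dir s).mp hc
        rw [List.drop_eq_nil_of_le (by omega)] at hp
        exact hdir (List.prefix_nil.mp hp)
    · replace hpast : start ≤ ext.length := by omega
      by_cases hF : PySem.Chars.findFrom ext dir (start : Int) = -1
      · -- no occurrence anywhere at or after start
        rw [pvALoop]
        simp only [hF]
        have hno := (PySem.Chars.findFrom_natCast_eq_neg_one_iff ext dir start hpast).mp hF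
        refine (pv_foldl_fixed _ _ (fun a s hs => ?_) acc).symm
        have hs' : start ≤ s := (List.mem_range'_1.mp hs).1
        refine pv_step_no_match cols r ext dir a s (fun hp => hno ?_)
        have : ext.drop s = (ext.drop start).drop (s - start) := by
          rw [List.drop_drop]; congr 1; omega
        rw [this] at hp
        exact pv_prefix_drop_infix dir (ext.drop start) (s - start) hp
      · have hspec := PySem.Chars.findFrom_natCast_spec ext dir start hpast hF
        obtain ⟨hle, hpre, hmin⟩ := hspec
        set F := PySem.Chars.findFrom ext dir (start : Int) with hFdef
        by_cases hge : (cols : Int) ≤ F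
        · -- first occurrence is at or beyond cols: A stops; every scanned position is below it
          rw [pvALoop]
          simp only [← hFdef, hF, false_or]
          rw [if_pos hge]
          refine (pv_foldl_fixed _ _ (fun a s hs => ?_) acc).symm
          have hs' := List.mem_range'_1.mp hs
          exact pv_step_no_match cols r ext dir a s (hmin s hs'.1 (by omega))
        · -- first occurrence F is inside [start, cols): both sides mark it, then continue at F+1
          replace hge : F < (cols : Int) := by omega
          have hF0 : 0 ≤ F := le_trans (by omega) hle
          have hFn : F = ((F.toNat : Nat) : Int) := by omega
          have hjlt : F.toNat < cols := by omega
          have hjge : start ≤ F.toNat := by omega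
          rw [pvALoop]
          simp only [← hFdef, hF, false_or]
          rw [if_neg (not_le.mpr hge)]
          have hsplit : List.range' start (cols - start)
              = List.range' start (F.toNat - start) ++ List.range' F.toNat 1
                ++ List.range' (F.toNat + 1) (cols - (F.toNat + 1)) := by
            rw [List.append_assoc]
            rw [show List.range' F.toNat 1 ++ List.range' (F.toNat + 1) (cols - (F.toNat + 1))
                  = List.range' F.toNat (1 + (cols - (F.toNat + 1))) by
                have := List.range'_append (s := F.toNat) (m := 1)
                  (n := cols - (F.toNat + 1)) (step := 1)
                simpa using this]
            have := List.range'_append (s := start) (m := F.toNat - start)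
              (n := 1 + (cols - (F.toNat + 1))) (step := 1)
            simp only [one_mul] at this
            rw [show start + (F.toNat - start) = F.toNat by omega] at this
            rw [this]; congr 1; omega
          rw [hsplit, List.foldl_append, List.foldl_append]
          have hskip : (List.range' start (F.toNat - start)).foldl (pvStep cols r ext dir) acc
              = acc := by
            refine pv_foldl_fixed _ _ (fun a s hs => ?_) acc
            have hs' := List.mem_range'_1.mp hs
            exact pv_step_no_match cols r ext dir a s (hmin s hs'.1 (by omega))
          rw [hskip]
          have hmark : (List.range' F.toNat 1).foldl (pvStep cols r ext dir) acc
              = (PySem.List.pyRange F (F + (dir.length : Int)) 1).foldl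
                  (fun a i => PySem.Set.add a (r, PySem.Int.mod i (cols : Int))) acc := by
            simp only [List.range'_one, List.foldl_cons, List.foldl_nil]
            unfold pvStep
            rw [if_pos ((pv_slice_test ext dir F.toNat).mpr hpre)]
            rw [← hFn]
          rw [hmark]
          exact ih (F.toNat + 1)
            ((PySem.List.pyRange F (F + (dir.length : Int)) 1).foldl
              (fun a i => PySem.Set.add a (r, PySem.Int.mod i (cols : Int))) acc)
            (by omega) (by omega)

-- B's sieve collapses to a single filter: a start survives iff every offset test holds
theorem pv_sieve_eq (ext : List Char) :
    ∀ (l : List (Int × Char)) (c : List Int),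
    l.foldl (fun c jc => c.filter (fun s => PySem.List.pyGet? ext (s + jc.1) == some jc.2)) c
      = c.filter (fun s => l.all (fun jc => PySem.List.pyGet? ext (s + jc.1) == some jc.2)) := by
  intro l
  induction l with
  | nil => intro c; simp
  | cons x xs ih =>
    intro c
    simp only [List.foldl_cons, ih, List.filter_filter, List.all_cons]
    exact List.filter_congr (fun s _ => by rw [Bool.and_comm])

-- pointwise: for a nonempty pattern, B's combined candidate test is the prefix test
theorem pv_pointwise (ext dir : List Char) (hdir : dir ≠ []) (s : Nat) :
    ((decide ((s : Int) + (dir.length : Int) ≤ (ext.length : Int))) &&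
      (PySem.List.enumerate dir).all
        (fun jc => PySem.List.pyGet? ext ((s : Int) + jc.1) == some jc.2))
      = decide (dir <+: ext.drop s) := by
  rw [Bool.eq_iff_iff]
  simp only [Bool.and_eq_true, List.all_eq_true, decide_eq_true_eq,
    List.prefix_iff_getElem?]
  constructor
  · rintro ⟨-, hall⟩ i hi
    have := hall (((i : Nat) : Int), dir[i]) (by
      rw [PySem.List.mem_enumerate_iff]; exact ⟨i, hi, by simp⟩)
    rw [beq_iff_eq, show (s : Int) + ((i : Nat) : Int) = (((s + i : Nat) : Int)) by push_cast; ring,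
      PySem.List.pyGet?_natCast] at this
    rw [List.getElem?_drop]
    exact this
  · intro hall
    have hd0 : 0 < dir.length := List.length_pos_iff.mpr hdir
    have hlen : s + dir.length ≤ ext.length := by
      have hlast := hall (dir.length - 1) (by omega)
      rw [List.getElem?_drop] at hlast
      have := (List.getElem?_eq_some_iff.mp hlast).1
      omega
    refine ⟨by exact_mod_cast hlen, ?_⟩
    intro jc hjc
    rw [PySem.List.mem_enumerate_iff] at hjc
    obtain ⟨k, hk, rfl⟩ := hjc
    have := hall k hk
    rw [List.getElem?_drop] at this
    simp only [zero_add, beq_iff_eq]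
    rw [show (s : Int) + ((k : Nat) : Int) = (((s + k : Nat) : Int)) by push_cast; ring,
      PySem.List.pyGet?_natCast]
    exact this

-- per-direction bridge: A's find loop with full fuel equals B's sieve-and-expand
theorem pv_bridge (cols : Nat) (r : Int) (ext dir : List Char) (acc : List (Int × Int)) :
    pvALoop (cols + 1) (cols : Int) r ext dir (dir.length : Int) 0 acc
      = pvBDir (cols : Int) r ext dir acc := by
  rw [pv_loop_eq cols r ext dir (cols + 1) 0 acc (Nat.zero_le _) (by omega), Nat.sub_zero]
  by_cases hdir : dir = []
  · subst hdir
    rw [pv_foldl_fixed _ _ (fun a s _ => by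
      unfold pvStep
      simp [PySem.List.pyRange]) acc]
    unfold pvBDir
    simp only [PySem.List.enumerate_nil, List.foldl_nil, List.length_nil, Nat.cast_zero,
      add_zero]
    exact (pv_foldl_fixed _ _ (fun a s _ => by simp [PySem.List.pyRange]) acc).symm
  · simp only [pvBDir]
    rw [pv_sieve_eq, List.filter_filter, PySem.List.pyRange_zero_natCast cols,
      List.filter_map, List.foldl_map, ← List.range_eq_range']
    have hstep : pvStep cols r ext dir = fun (a : List (Int × Int)) (s : Nat) =>
        if PySem.List.slice ext (some (s : Int)) (some ((s : Int) + (dir.length : Int))) = dir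
        then (PySem.List.pyRange (s : Int) ((s : Int) + (dir.length : Int)) 1).foldl
          (fun a i => PySem.Set.add a (r, PySem.Int.mod i (cols : Int))) a
        else a := rfl
    rw [hstep]
    rw [PySem.List.foldl_ite_eq_foldl_filter
      (p := fun s : Nat => PySem.List.slice ext (some (s : Int))
        (some ((s : Int) + (dir.length : Int))) = dir)]
    have hfil : (List.range cols).filter
        (fun s : Nat => decide (PySem.List.slice ext (some (s : Int))
          (some ((s : Int) + (dir.length : Int))) = dir))
        = (List.range cols).filter
          ((fun s : Int => ((PySem.List.enumerate dir).all
              (fun jc => PySem.List.pyGet? ext (s + jc.1) == some jc.2)) &&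
            decide (s + (dir.length : Int) ≤ (ext.length : Int))) ∘ (fun k : Nat => (k : Int))) := by
      refine List.filter_congr (fun k _ => ?_)
      simp only [Function.comp]
      rw [Bool.and_comm, pv_pointwise ext dir hdir k, decide_eq_decide]
      exact pv_slice_test ext dir k
    rw [hfil]

-- ===== VERDICT (by name: the statement is the Claim_ definition above) =====
theorem search_horizontal_spec : Claim_equal_search_horizontal := by
  intro runes inscriptions _ _
  unfold Spec_search_horizontal search_horizontal search_horizontal_alt
  simp only [PySem.Str.len_eq]
  set row0 := PySem.List.pyGetD inscriptions 0 ""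
  set c : Nat := row0.toList.length with hc
  have hfuel : ((c : Int)).toNat + 1 = c + 1 := by simp
  congr 1
  funext acc rrow
  congr 1
  funext acc rune
  simp only [List.foldl_cons, List.foldl_nil]
  rw [hfuel]
  rw [pv_bridge c rrow.1 (rrow.2.toList ++ rrow.2.toList) rune.toList acc]
  rw [show ((rune.toList.length : Int)) = ((rune.toList.reverse.length : Int)) by simp]
  rw [pv_bridge c rrow.1 (rrow.2.toList ++ rrow.2.toList) rune.toList.reverse _]
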